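-- pv_equiv track=rewrite | github.com/CokieMiner/SymbAnaFis | tools/import_audit.py | boundary_for_module
-- ===== SOURCE A (Python) =====
-- def boundary_for_module(module: str, boundaries: set[str]) -> str | None:
--     candidates = [
--         boundary
--         for boundary in boundaries
--         if module == boundary or module.startswith(f"{boundary}::")
--     ]
--     if not candidates:
--         return None
--     return max(candidates, key=lambda item: item.count("::"))
-- ===== SOURCE B (Python) =====
-- def boundary_for_module(module: str, boundaries: set[str]) -> str | None:
--     # Scan the module's "::" separators left to right and remember the deepest
--     # ancestor prefix that is a registered boundary.
--     if module in boundaries: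
--         return module
--     best = None
--     i = module.find("::")
--     while i != -1:
--         prefix = module[:i]
--         if prefix in boundaries:
--             best = prefix
--         i = module.find("::", i + 1)
--     return best
-- ===== Notes on version B (the rewrite author's own statement) =====
-- stated objective: faster
-- what changed: Instead of testing every boundary against the module and taking max by '::'-count, B walks the module's '::'-ancestor prefixes from deepest to shallowest and returns the first one in the boundary set; Pre_ excludes inputs where two matching boundaries have the same '::'-depth, on which A's choice among the equally-deep candidates is an accident of set iteration order.
-- outside the precondition, e.g. on boundary_for_module('a:::b', {'a:', 'a'}): A returns 'a', B returns 'a:'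
import Mathlib
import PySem

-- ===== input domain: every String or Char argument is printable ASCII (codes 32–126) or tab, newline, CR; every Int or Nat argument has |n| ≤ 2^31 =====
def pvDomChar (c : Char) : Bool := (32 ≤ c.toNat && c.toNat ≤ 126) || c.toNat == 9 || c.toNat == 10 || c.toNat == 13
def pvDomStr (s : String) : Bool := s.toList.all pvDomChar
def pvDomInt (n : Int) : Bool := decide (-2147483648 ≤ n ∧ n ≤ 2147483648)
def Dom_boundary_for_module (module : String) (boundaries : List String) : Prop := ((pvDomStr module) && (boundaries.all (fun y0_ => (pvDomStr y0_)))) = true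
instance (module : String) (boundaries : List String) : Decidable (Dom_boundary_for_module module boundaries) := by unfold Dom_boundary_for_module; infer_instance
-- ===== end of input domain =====

-- B replaces A's scan of every boundary with a single left-to-right walk of the module's
-- "::"-ancestor prefixes, keeping the deepest one found in the boundary set (objective:
-- faster); Pre_ excludes inputs where two matching boundaries have equal "::"-depth,
-- on which A's choice among equally-deep candidates is accidental set-iteration order.


-- ===== PORT A =====
-- module == boundary or module.startswith(f"{boundary}::")   (exact: Chars.startswith on toList)
def pvCandA (module boundary : String) : Bool :=
  module == boundary || PySem.Chars.startswith module.toList (boundary.toList ++ [':', ':'])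

def boundary_for_module (module : String) (boundaries : List String) : Option String :=
  let candidates := boundaries.filter (fun boundary => pvCandA module boundary)
  if candidates.isEmpty then none
  else PySem.List.max? candidates (fun item => PySem.Str.count item "::")

-- ===== PORT B =====
-- the 'while i != -1' loop of Source B; fuel only makes the recursion structural, the
-- computation is step for step Source B's (i = module.find("::", i + 1) each round)
def pvLoopB (m : List Char) (boundaries : List String) : Nat → Int → Option String → Option String
  | 0, _, best => best
  | fuel + 1, i, best =>
      if i = -1 then best
      else
        let p := String.ofList (PySem.List.slice m none (some i))     -- module[:i]
        let best' := if boundaries.contains p then some p else best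
        pvLoopB m boundaries fuel (PySem.Chars.findFrom m [':', ':'] (i + 1)) best'

def boundary_for_module_alt (module : String) (boundaries : List String) : Option String :=
  if boundaries.contains module then some module
  else
    let m := module.toList
    pvLoopB m boundaries (m.length + 1) (PySem.Chars.find m [':', ':']) none

-- ===== PRECONDITION & SPEC =====
-- b is the module itself or an ancestor prefix of it (exactly A's candidate test, as a Prop)
def pvAncestor (module b : String) : Prop := b = module ∨ (b.toList ++ [':', ':']) <+: module.toList

-- Pre_ excludes inputs where two matching boundaries have the same "::"-depth: there A's
-- max over a SET picks whichever equally-deep candidate set iteration yields first — an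
-- accidental choice no caller could rely on (and one a list-based port cannot reproduce).
def Pre_boundary_for_module (module : String) (boundaries : List String) : Prop :=
  ∀ b ∈ boundaries, ∀ c ∈ boundaries, pvAncestor module b → pvAncestor module c →
    b.toList.length < c.toList.length → PySem.Str.count b "::" < PySem.Str.count c "::"

instance (module : String) (boundaries : List String) : Decidable (Pre_boundary_for_module module boundaries) := by unfold Pre_boundary_for_module pvAncestor; infer_instance

def pvWitness_boundary_for_module : String × List String := ("pkg::sub::leaf", ["pkg", "pkg::sub", "other"])

def Spec_boundary_for_module (module : String) (boundaries : List String) (out : Option String) : Prop := out = boundary_for_module_alt module boundaries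
instance (module : String) (boundaries : List String) (out : Option String) : Decidable (Spec_boundary_for_module module boundaries out) := by unfold Spec_boundary_for_module; infer_instance

-- ===== CLAIM (what is proved, stated in full; the proofs are below) =====
def Claim_equal_boundary_for_module : Prop := ∀ (module : String) (boundaries : List String), Dom_boundary_for_module module boundaries → Pre_boundary_for_module module boundaries → Spec_boundary_for_module module boundaries (boundary_for_module module boundaries)

-- ===== LEMMAS AND PROOFS =====

-- n is a "::"-occurrence position of m
def pvOcc (m : List Char) (n : Nat) : Bool := decide ([':', ':'] <+: List.drop n m)

-- the prefixes Source B's loop sees from position k on that lie in bs (in increasing position order)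
def pvCollect (m : List Char) (bs : List String) (k : Nat) : List String :=
  (((List.range m.length).filter (fun n => decide (k ≤ n) && pvOcc m n)).map
    (fun n => String.ofList (List.take n m))).filter (fun p => bs.contains p)

theorem pvFilterRange (len k jn : Nat) (q : Nat → Bool) (hk : k ≤ jn) (hj : jn < len)
    (hq : q jn = true) (hmin : ∀ n, k ≤ n → n < jn → q n = false) :
    (List.range len).filter (fun n => decide (k ≤ n) && q n)
      = jn :: (List.range len).filter (fun n => decide (jn + 1 ≤ n) && q n) := by
  have hsplit : len = (jn + 1) + (len - (jn + 1)) := by omega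
  rw [hsplit, List.range_add, List.filter_append, List.filter_append]
  have h1 : (List.range (jn + 1)).filter (fun n => decide (k ≤ n) && q n) = [jn] := by
    rw [List.range_succ, List.filter_append]
    have ha : (List.range jn).filter (fun n => decide (k ≤ n) && q n) = [] := by
      rw [List.filter_eq_nil_iff]
      intro n hn
      have hn' : n < jn := List.mem_range.mp hn
      by_cases hkn : k ≤ n
      · simp [hkn, hmin n hkn hn']
      · simp [hkn]
    rw [ha]
    simp [hk, hq]
  have h2 : (List.range (jn + 1)).filter (fun n => decide (jn + 1 ≤ n) && q n) = [] := by
    rw [List.filter_eq_nil_iff]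
    intro n hn
    have hn' : n < jn + 1 := List.mem_range.mp hn
    simp [Nat.not_le.mpr hn']
  have h3 : (List.map (fun x => jn + 1 + x) (List.range (len - (jn + 1)))).filter
        (fun n => decide (k ≤ n) && q n)
      = (List.map (fun x => jn + 1 + x) (List.range (len - (jn + 1)))).filter
        (fun n => decide (jn + 1 ≤ n) && q n) := by
    rw [List.filter_map, List.filter_map]
    congr 1
    apply List.filter_congr
    intro x _
    have e1 : k ≤ jn + 1 + x := by omega
    have e2 : jn + 1 ≤ jn + 1 + x := by omega
    simp [Function.comp, e1, e2]
  rw [h1, h2, h3]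
  simp

-- Source B's loop = overwrite-fold of the collected prefixes over the running best
theorem pvLoopB_collect (m : List Char) (bs : List String) :
    ∀ (fuel k : Nat) (best : Option String), k ≤ m.length → m.length + 1 - k ≤ fuel →
      pvLoopB m bs fuel (PySem.Chars.findFrom m [':', ':'] (k : Int)) best
        = List.foldl (fun _ p => some p) best (pvCollect m bs k) := by
  intro fuel
  induction fuel with
  | zero => intro k best hk hf; omega
  | succ fuel ih =>
      intro k best hk hf
      by_cases hneg : PySem.Chars.findFrom m [':', ':'] (k : Int) = -1
      · rw [hneg]
        unfold pvLoopB
        rw [if_pos rfl]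
        have hno : ¬ [':', ':'] <:+: List.drop k m :=
          (PySem.Chars.findFrom_natCast_eq_neg_one_iff m [':', ':'] k hk).mp hneg
        have hby : (List.range m.length).filter (fun n => decide (k ≤ n) && pvOcc m n) = [] := by
          rw [List.filter_eq_nil_iff]
          intro n _
          by_cases hkn : k ≤ n
          · have hnp : ¬ ([':', ':'] <+: List.drop n m) := by
              intro hpre
              apply hno
              obtain ⟨r, hr⟩ := hpre
              refine ⟨List.take (n - k) (List.drop k m), r, ?_⟩
              have hdd : List.drop n m = List.drop (n - k) (List.drop k m) := by
                rw [List.drop_drop]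
                congr 1
                omega
              rw [List.append_assoc, hr, hdd, List.take_append_drop]
            simp [pvOcc, hnp]
          · simp [hkn]
        unfold pvCollect
        rw [hby]
        simp
      · obtain ⟨hkj, hpre, hmin⟩ :=
          PySem.Chars.findFrom_natCast_spec m [':', ':'] k hk hneg
        set j := PySem.Chars.findFrom m [':', ':'] (k : Int) with hj
        have hj0 : 0 ≤ j := le_trans (Int.natCast_nonneg k) hkj
        have hjcast : j = ((j.toNat : Nat) : Int) := (Int.toNat_of_nonneg hj0).symm
        set jn := j.toNat with hjn
        have hkjn : k ≤ jn := by omega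
        have hlen : jn + 2 ≤ m.length := by
          have h2 := hpre.length_le
          simp [List.length_drop] at h2
          omega
        unfold pvLoopB
        rw [if_neg hneg]
        have hslice : PySem.List.slice m none (some j) = List.take jn m := by
          rw [hjcast, PySem.List.slice_to_natCast]
        have hcast2 : j + 1 = ((jn + 1 : Nat) : Int) := by rw [hjcast]; push_cast; ring
        rw [hslice, hcast2, ih (jn + 1) _ (by omega) (by omega)]
        have hqj : pvOcc m jn = true := by simp [pvOcc]; exact hpre
        have hminb : ∀ n, k ≤ n → n < jn → pvOcc m n = false := by
          intro n h1 h2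
          simp [pvOcc]
          exact hmin n h1 h2
        have hsplit := pvFilterRange m.length k jn (pvOcc m) hkjn (by omega) hqj hminb
        unfold pvCollect
        rw [hsplit]
        simp only [List.map_cons, List.filter_cons]
        by_cases hb : bs.contains (String.ofList (List.take jn m)) = true
        · rw [if_pos hb, if_pos hb, List.foldl_cons]
        · rw [if_neg hb, if_neg hb]

-- overwrite-fold returns the last element when there is one
theorem pvFoldl_overwrite (l : List String) (b : Option String) :
    List.foldl (fun _ p => some p) b l = l.getLast?.or b := by
  induction l generalizing b with
  | nil => simp
  | cons a t ih =>
      rw [List.foldl_cons, ih (some a), List.getLast?_cons]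
      cases ht : t.getLast? with
      | none =>
          have : t = [] := List.getLast?_eq_none_iff.mp ht
          subst this
          simp [Option.or]
      | some x =>
          have : t ≠ [] := by
            intro h; subst h; simp at ht
          simp [Option.or]

-- candidate characterisation: A's predicate names exactly the ancestor prefixes
theorem pvCand_char (module b : String) :
    pvCandA module b = true
      ↔ b = module
        ∨ ∃ n, n < module.toList.length ∧ pvOcc module.toList n = true
            ∧ b = String.ofList (List.take n module.toList) := by
  unfold pvCandA
  simp only [Bool.or_eq_true, beq_iff_eq, PySem.Chars.startswith_iff]
  constructor
  · rintro (rfl | ⟨t, ht⟩)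
    · left; rfl
    · right
      refine ⟨b.toList.length, ?_, ?_, ?_⟩
      · have : module.toList.length = b.toList.length + 2 + t.length := by
          rw [← ht]; simp; omega
        omega
      · have hd : List.drop b.toList.length module.toList = ':' :: ':' :: t := by
          rw [← ht]
          have : b.toList ++ [':', ':'] ++ t = b.toList ++ ([':', ':'] ++ t) := by
            rw [List.append_assoc]
          rw [this, List.drop_left]
          rfl
        simp only [pvOcc, decide_eq_true_eq]
        rw [hd]
        exact ⟨t, rfl⟩
      · rw [← ht]
        have : b.toList ++ [':', ':'] ++ t = b.toList ++ ([':', ':'] ++ t) := by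
          rw [List.append_assoc]
        rw [this, List.take_left, String.ofList_toList]
  · rintro (rfl | ⟨n, hn, hocc, rfl⟩)
    · left; rfl
    · right
      simp only [pvOcc, decide_eq_true_eq] at hocc
      obtain ⟨t, ht⟩ := hocc
      refine ⟨t, ?_⟩
      rw [String.toList_ofList]
      calc List.take n module.toList ++ [':', ':'] ++ t
          = List.take n module.toList ++ ([':', ':'] ++ t) := by rw [List.append_assoc]
        _ = List.take n module.toList ++ List.drop n module.toList := by rw [ht]
        _ = module.toList := List.take_append_drop n module.toList

-- A's candidate test, as the Prop the precondition speaks about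
theorem pvCandA_iff_ancestor (module b : String) :
    pvCandA module b = true ↔ pvAncestor module b := by
  unfold pvCandA pvAncestor
  simp only [Bool.or_eq_true, beq_iff_eq, PySem.Chars.startswith_iff]
  constructor
  · rintro (rfl | h)
    · exact Or.inl rfl
    · exact Or.inr h
  · rintro (rfl | h)
    · exact Or.inl rfl
    · exact Or.inr h

-- membership of the collected-prefix list (k = 0)
theorem pvCollect_mem (module : String) (bs : List String) (x : String) :
    x ∈ pvCollect module.toList bs 0
      ↔ (∃ n, n < module.toList.length ∧ pvOcc module.toList n = true
            ∧ x = String.ofList (List.take n module.toList)) ∧ x ∈ bs := by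
  unfold pvCollect
  rw [List.mem_filter]
  constructor
  · rintro ⟨hmap, hcx⟩
    rcases List.mem_map.mp hmap with ⟨n, hn, rfl⟩
    rcases List.mem_filter.mp hn with ⟨hrange, hq⟩
    have hocc : pvOcc module.toList n = true := by simpa using hq
    exact ⟨⟨n, List.mem_range.mp hrange, hocc, rfl⟩, List.contains_iff_mem.mp hcx⟩
  · rintro ⟨⟨n, hn, hocc, rfl⟩, hmem⟩
    refine ⟨List.mem_map.mpr ⟨n, ?_, rfl⟩, List.contains_iff_mem.mpr hmem⟩
    apply List.mem_filter.mpr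
    refine ⟨List.mem_range.mpr hn, ?_⟩
    simp [hocc]

-- the collected prefixes come in strictly increasing length
theorem pvCollect_pairwise (module : String) (bs : List String) :
    (pvCollect module.toList bs 0).Pairwise
      (fun a b => a.toList.length < b.toList.length) := by
  unfold pvCollect
  apply List.Pairwise.filter
  rw [List.pairwise_map]
  have hr : (List.range module.toList.length).Pairwise (· < ·) := List.pairwise_lt_range
  have hf := hr.filter (fun n => decide (0 ≤ n) && pvOcc module.toList n)
  refine hf.imp_of_mem ?_
  intro a b ha hb hab
  have ha' : a < module.toList.length :=
    List.mem_range.mp (List.mem_of_mem_filter ha)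
  have hb' : b < module.toList.length :=
    List.mem_range.mp (List.mem_of_mem_filter hb)
  simp only [String.toList_ofList, List.length_take]
  omega

-- the running state of Python max(..., key=...), as a named step function
def pvStep (key : String → Nat) (acc : Option String) (x : String) : Option String :=
  match acc with
  | none => some x
  | some c => if key c < key x then some x else some c

-- acc never moves off an element no later element strictly beats
theorem pvFoldl_const {l : List String} {key : String → Nat} {m : String}
    (h : ∀ y ∈ l, key y ≤ key m) :
    List.foldl (pvStep key) (some m) l = some m := by
  induction l with
  | nil => rfl
  | cons a t ih =>
      have ha : key a ≤ key m := h a (by simp)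
      simp only [List.foldl_cons]
      show List.foldl (pvStep key) (if key m < key a then some a else some m) t = some m
      rw [if_neg (not_lt.mpr ha)]
      exact ih (fun y hy => h y (by simp [hy]))

theorem pvFoldl_unique {key : String → Nat} {L : String} :
    ∀ (t : List String) (c : String), L ∈ t → (∀ y ∈ t, y ≠ L → key y < key L) →
      key c < key L → List.foldl (pvStep key) (some c) t = some L := by
  intro t
  induction t with
  | nil => intro c h _ _; simp at h
  | cons a t' ih =>
      intro c hL hlt hc
      simp only [List.foldl_cons]
      by_cases ha : a = L
      · subst ha
        show List.foldl (pvStep key) (if key c < key a then some a else some c) t' = some a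
        rw [if_pos hc]
        exact pvFoldl_const (fun y hy => by
          by_cases hyL : y = a
          · subst hyL; exact le_refl _
          · exact le_of_lt (hlt y (by simp [hy]) hyL))
      · have hL' : L ∈ t' := by
          rcases List.mem_cons.mp hL with h | h
          · exact absurd h.symm ha
          · exact h
        have hka : key a < key L := hlt a (by simp) ha
        show List.foldl (pvStep key) (if key c < key a then some a else some c) t' = some L
        by_cases hca : key c < key a
        · rw [if_pos hca]
          exact ih a hL' (fun y hy hyL => hlt y (by simp [hy]) hyL) hka
        · rw [if_neg hca]
          exact ih c hL' (fun y hy hyL => hlt y (by simp [hy]) hyL) hc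

-- Python max(l, key) when one element strictly dominates all others
theorem pvMax_unique {l : List String} {key : String → Nat} {L : String}
    (hL : L ∈ l) (h : ∀ y ∈ l, y ≠ L → key y < key L) :
    PySem.List.max? l key = some L := by
  have hmax : PySem.List.max? l key = List.foldl (pvStep key) none l := by
    unfold PySem.List.max?
    congr 1
    funext acc x
    cases acc <;> rfl
  rw [hmax]
  cases l with
  | nil => simp at hL
  | cons a t =>
      simp only [List.foldl_cons]
      show List.foldl (pvStep key) (some a) t = some L
      by_cases ha : a = L
      · subst ha
        exact pvFoldl_const (fun y hy => by
          by_cases hyL : y = a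
          · subst hyL; exact le_refl _
          · exact le_of_lt (h y (by simp [hy]) hyL))
      · have hL' : L ∈ t := by
          rcases List.mem_cons.mp hL with hh | hh
          · exact absurd hh.symm ha
          · exact hh
        exact pvFoldl_unique t a hL' (fun y hy hyL => h y (by simp [hy]) hyL)
          (h a (by simp) ha)

-- ===== VERDICT (by name: the statement is the Claim_ definition above) =====
theorem boundary_for_module_spec : Claim_equal_boundary_for_module := by
  intro module boundaries _ hpre
  unfold Spec_boundary_for_module boundary_for_module boundary_for_module_alt
  set key : String → Nat := fun item => PySem.Str.count item "::" with hkey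
  set cands := boundaries.filter (fun boundary => pvCandA module boundary) with hcand
  have hmemc : ∀ b, b ∈ cands ↔ pvCandA module b = true ∧ b ∈ boundaries := by
    intro b
    rw [hcand, List.mem_filter]
    tauto
  set L := pvCollect module.toList boundaries 0 with hLdef
  have hloop : pvLoopB module.toList boundaries (module.toList.length + 1)
      (PySem.Chars.find module.toList [':', ':']) none = L.getLast?.or none := by
    rw [← PySem.Chars.findFrom_zero]
    have h0 : ((0 : Nat) : Int) = (0 : Int) := rfl
    rw [← h0, pvLoopB_collect module.toList boundaries (module.toList.length + 1) 0 none
        (by omega) (by omega), pvFoldl_overwrite]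
  -- strict key dominance from Pre_ via lengths
  have hdom : ∀ b c : String, b ∈ boundaries → c ∈ boundaries →
      pvCandA module b = true → pvCandA module c = true →
      b.toList.length < c.toList.length → key b < key c := by
    intro b c hb hc hab hac hlen
    exact hpre b hb c hc ((pvCandA_iff_ancestor module b).mp hab)
      ((pvCandA_iff_ancestor module c).mp hac) hlen
  by_cases hcm : boundaries.contains module = true
  · -- B returns module; A: module is the unique strict maximum among candidates
    rw [if_pos hcm]
    have hmemm : module ∈ cands := (hmemc module).mpr
      ⟨by unfold pvCandA; simp, List.contains_iff_mem.mp hcm⟩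
    have hne : cands.isEmpty = false := by
      rcases cands with _ | _
      · simp at hmemm
      · rfl
    rw [if_neg (by simp [hne])]
    apply pvMax_unique hmemm
    intro y hy hyne
    have hyc := (hmemc y).mp hy
    apply hdom y module hyc.2 (List.contains_iff_mem.mp hcm) hyc.1
      (by unfold pvCandA; simp)
    rcases (pvCand_char module y).mp hyc.1 with rfl | ⟨n, hn, _, rfl⟩
    · exact absurd rfl hyne
    · simp only [String.toList_ofList, List.length_take]
      omega
  · -- module not a boundary: candidates are exactly the collected prefixes
    rw [if_neg hcm, hloop]
    have hmm : module ∉ boundaries := fun h => hcm (List.contains_iff_mem.mpr h)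
    have hmemL : ∀ x, x ∈ L ↔ x ∈ cands := by
      intro x
      rw [hLdef, pvCollect_mem, hmemc, pvCand_char]
      constructor
      · rintro ⟨hsh, hxb⟩
        exact ⟨Or.inr hsh, hxb⟩
      · rintro ⟨hsh | hsh, hxb⟩
        · subst hsh; exact absurd hxb hmm
        · exact ⟨hsh, hxb⟩
    cases hlast : L.getLast? with
    | none =>
        have hLnil : L = [] := List.getLast?_eq_none_iff.mp hlast
        have hcnil : cands = [] := by
          rw [List.eq_nil_iff_forall_not_mem]
          intro x hx
          have : x ∈ L := (hmemL x).mpr hx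
          rw [hLnil] at this
          simp at this
        rw [if_pos (by simp [hcnil])]
        rfl
    | some LAST =>
        have hLne : L ≠ [] := by
          intro h; rw [h] at hlast; simp at hlast
        have hLmem : LAST ∈ L := List.mem_of_getLast? hlast
        have hLc : LAST ∈ cands := (hmemL LAST).mp hLmem
        have hne : cands.isEmpty = false := by
          rcases hc : cands with _ | _
          · rw [hc] at hLc; simp at hLc
          · rfl
        rw [if_neg (by simp [hne])]
        -- every other element of L (= of cands) is a strictly shorter prefix
        rcases List.getLast?_eq_some_iff.mp hlast with ⟨l', hsplit⟩
        have hpair := pvCollect_pairwise module boundaries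
        rw [← hLdef] at hpair
        have hlen : ∀ y ∈ L, y ≠ LAST → y.toList.length < LAST.toList.length := by
          intro y hy hyne
          have hy' : y ∈ l' := by
            rw [hsplit] at hy
            rcases List.mem_append.mp hy with h | h
            · exact h
            · simp at h
              exact absurd h hyne
          have hp2 := (List.pairwise_append.mp (hsplit ▸ hpair)).2.2
          exact hp2 y hy' LAST (by simp)
        have hor : (some LAST).or (none : Option String) = some LAST := rfl
        rw [hor]
        apply pvMax_unique hLc
        intro y hy hyne
        have hyL : y ∈ L := (hmemL y).mpr hy
        have hyc := (hmemc y).mp hy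
        have hLb := (hmemc LAST).mp hLc
        exact hdom y LAST hyc.2 hLb.2 hyc.1 hLb.1 (hlen y hyL hyne)
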